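-- pv_equiv track=rewrite | github.com/twishi/PDBAnalysis | files/Main.py | convert_1L_to_fasta
-- ===== SOURCE A (Python) =====
-- def convert_1L_to_fasta(sequence1L,num,exp):
--     # La premiere ligne contient le code PDB et la methode expérimentale
--     sequenceFasta = ">"+str(num)+" "+str(exp)+"\n"
--     compteur = 0
--     for l in sequence1L:
--         if compteur != 80:
--             sequenceFasta = sequenceFasta + l
--             compteur = compteur + 1
--         else:
--             sequenceFasta = sequenceFasta + "\n" + l
--             compteur = 1
--     return sequenceFasta
-- ===== SOURCE B (Python) =====
-- def convert_1L_to_fasta(sequence1L, num, exp):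
--     header = ">" + str(num) + " " + str(exp) + "\n"
--     lines = []
--     rest = sequence1L
--     while rest:
--         lines.append("".join(rest[:80]))
--         rest = rest[80:]
--     return header + "\n".join(lines)
-- ===== Notes on version B (the rewrite author's own statement) =====
-- stated objective: faster
-- what changed: B replaces A's per-character loop with a running line counter (repeated string concatenation) by slicing the sequence into 80-wide chunks and joining them with newlines.
import Mathlib
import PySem

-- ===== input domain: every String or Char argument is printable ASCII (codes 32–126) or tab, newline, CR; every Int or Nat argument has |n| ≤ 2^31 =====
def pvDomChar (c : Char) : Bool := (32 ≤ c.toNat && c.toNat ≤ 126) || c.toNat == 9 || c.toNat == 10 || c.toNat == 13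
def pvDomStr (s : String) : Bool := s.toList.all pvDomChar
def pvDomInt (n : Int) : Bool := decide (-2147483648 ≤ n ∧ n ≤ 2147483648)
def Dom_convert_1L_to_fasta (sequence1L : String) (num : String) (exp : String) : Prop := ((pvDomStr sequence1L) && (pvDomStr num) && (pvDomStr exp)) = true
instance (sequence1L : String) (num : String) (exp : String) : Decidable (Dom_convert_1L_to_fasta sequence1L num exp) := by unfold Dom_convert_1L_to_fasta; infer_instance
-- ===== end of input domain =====

-- B replaces A's per-character loop (with a line counter) by slicing the sequence into
-- 80-character chunks and joining them with newlines; same return value, different decomposition.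

-- ===== PORT A =====
-- A's for-loop over the characters of sequence1L, carrying (sequenceFasta, compteur).
def fastaLoopA (sequenceFasta : String) (compteur : Int) : List Char → String
  | [] => sequenceFasta
  | l :: rest =>
    if compteur ≠ 80 then
      fastaLoopA (sequenceFasta ++ String.ofList [l]) (compteur + 1) rest
    else
      fastaLoopA (sequenceFasta ++ "\n" ++ String.ofList [l]) 1 rest

def convert_1L_to_fasta (sequence1L : String) (num : String) (exp : String) : String :=
  fastaLoopA (">" ++ num ++ " " ++ exp ++ "\n") 0 sequence1L.toList

-- ===== PORT B =====
-- B's while loop: peel off rest[:80] as a line, continue with rest[80:].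
def fastaLines (rest : List Char) : List String :=
  if h : rest = [] then []
  else
    String.ofList (PySem.List.slice rest none (some 80)) ::
      fastaLines (PySem.List.slice rest (some 80) none)
termination_by rest.length
decreasing_by
  rw [PySem.List.slice_from rest (by omega : (0:Int) ≤ 80)]
  cases rest with
  | nil => exact absurd rfl h
  | cons a t => simp

def convert_1L_to_fasta_alt (sequence1L : String) (num : String) (exp : String) : String :=
  let header := ">" ++ num ++ " " ++ exp ++ "\n"
  header ++ PySem.Str.join "\n" (fastaLines sequence1L.toList)

-- ===== PRECONDITION & SPEC =====
def Spec_convert_1L_to_fasta (sequence1L : String) (num : String) (exp : String) (out : String) : Prop := out = convert_1L_to_fasta_alt sequence1L num exp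
instance (sequence1L : String) (num : String) (exp : String) (out : String) : Decidable (Spec_convert_1L_to_fasta sequence1L num exp out) := by unfold Spec_convert_1L_to_fasta; infer_instance

-- ===== CLAIM (what is proved, stated in full; the proofs are below) =====
def Claim_equal_convert_1L_to_fasta : Prop := ∀ (sequence1L : String) (num : String) (exp : String), Dom_convert_1L_to_fasta sequence1L num exp → Spec_convert_1L_to_fasta sequence1L num exp (convert_1L_to_fasta sequence1L num exp)

-- ===== LEMMAS AND PROOFS =====

-- List-of-characters model of A's loop body (what the loop appends after the header).
def bodyA (k : Int) : List Char → List Char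
  | [] => []
  | c :: cs => if k ≠ 80 then c :: bodyA (k + 1) cs else '\n' :: c :: bodyA 1 cs

-- List-of-characters model of B's joined chunk lines.
def linesFlat (l : List Char) : List Char :=
  if l = [] then []
  else l.take 80 ++ (if l.drop 80 = [] then [] else '\n' :: linesFlat (l.drop 80))
termination_by l.length
decreasing_by
  cases l with
  | nil => simp_all
  | cons a t => simp

theorem linesFlat_nil : linesFlat [] = [] := by rw [linesFlat]; simp

theorem linesFlat_ne_nil (l : List Char) (h : l ≠ []) :
    linesFlat l = l.take 80 ++ (if l.drop 80 = [] then [] else '\n' :: linesFlat (l.drop 80)) := by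
  conv_lhs => rw [linesFlat]
  simp [h]

theorem fastaLines_nil : fastaLines [] = [] := by rw [fastaLines]; simp

theorem fastaLines_ne_nil (l : List Char) (h : l ≠ []) :
    fastaLines l = String.ofList (l.take 80) :: fastaLines (l.drop 80) := by
  conv_lhs => rw [fastaLines]
  rw [PySem.List.slice_to l (by omega : (0:Int) ≤ 80),
      PySem.List.slice_from l (by omega : (0:Int) ≤ 80)]
  simp [h]

theorem fastaLines_eq_nil_iff (l : List Char) : fastaLines l = [] ↔ l = [] := by
  constructor
  · intro h
    by_contra hl
    rw [fastaLines_ne_nil l hl] at h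
    simp at h
  · intro h; rw [h, fastaLines_nil]

theorem fastaLoopA_toList (l : List Char) : ∀ (acc : String) (k : Int),
    (fastaLoopA acc k l).toList = acc.toList ++ bodyA k l := by
  induction l with
  | nil => intro acc k; simp [fastaLoopA, bodyA]
  | cons c cs ih =>
      intro acc k
      by_cases h : k ≠ 80 <;> simp [fastaLoopA, bodyA, h, ih]

theorem join_fastaLines_toList_aux (n : Nat) : ∀ (l : List Char), l.length ≤ n →
    (PySem.Str.join "\n" (fastaLines l)).toList = linesFlat l := by
  induction n with
  | zero =>
      intro l hl
      have : l = [] := List.eq_nil_of_length_eq_zero (Nat.le_zero.mp hl)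
      subst this
      rw [fastaLines_nil, linesFlat_nil]
      simp [PySem.Str.toList_join, PySem.Chars.join_nil]
  | succ n ih =>
      intro l hl
      by_cases h : l = []
      · subst h
        rw [fastaLines_nil, linesFlat_nil]
        simp [PySem.Str.toList_join, PySem.Chars.join_nil]
      · rw [fastaLines_ne_nil l h, linesFlat_ne_nil l h]
        by_cases hd : l.drop 80 = []
        · rw [hd, fastaLines_nil]
          simp [PySem.Str.toList_join, PySem.Chars.join_singleton]
        · have hlen : (l.drop 80).length ≤ n := by
            have : l.length ≥ 1 := List.length_pos_iff.mpr h
            simp only [List.length_drop]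
            omega
          obtain ⟨x, xs, hx⟩ := List.exists_cons_of_ne_nil
            ((not_iff_not.mpr (fastaLines_eq_nil_iff (l.drop 80))).mpr hd)
          have hih := ih (l.drop 80) hlen
          rw [PySem.Str.toList_join] at hih ⊢
          rw [hx, List.map_cons, List.map_cons, PySem.Chars.join_cons_cons,
              ← List.map_cons, ← hx, hih]
          simp [hd]

theorem bodyA_key (l : List Char) : ∀ (r : Nat), r ≤ 80 →
    bodyA ((80 : Int) - r) l
      = l.take r ++ (if l.drop r = [] then [] else '\n' :: linesFlat (l.drop r)) := by
  induction l with
  | nil => intro r _; simp [bodyA]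
  | cons c cs ih =>
      intro r hr
      rw [bodyA]
      split
      · -- compteur ≠ 80, i.e. r ≥ 1
        rename_i hk
        cases r with
        | zero => exfalso; apply hk; norm_num
        | succ s =>
            have h2 : (80 : Int) - ((s + 1 : Nat) : Int) + 1 = (80 : Int) - ((s : Nat) : Int) := by
              push_cast; omega
            rw [h2, ih s (by omega)]
            simp
      · -- compteur = 80, i.e. r = 0: emit the newline and start a fresh line
        rename_i hk
        have hr0 : r = 0 := by
          by_contra hne
          exact hk (by omega)
        subst hr0
        have h1 : (1 : Int) = (80 : Int) - ((79 : Nat) : Int) := by norm_num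
        rw [h1, ih 79 (by omega)]
        simp only [List.take_zero, List.drop_zero, List.nil_append,
                   if_neg (List.cons_ne_nil c cs)]
        rw [linesFlat_ne_nil (c :: cs) (by simp)]
        simp

theorem bodyA_zero (l : List Char) : bodyA 0 l = linesFlat l := by
  have h : (0 : Int) = (80 : Int) - ((80 : Nat) : Int) := by norm_num
  rw [h, bodyA_key l 80 (le_refl _)]
  by_cases hl : l = []
  · subst hl; rw [linesFlat_nil]; simp
  · rw [linesFlat_ne_nil l hl]

-- ===== VERDICT (by name: the statement is the Claim_ definition above) =====
theorem convert_1L_to_fasta_spec : Claim_equal_convert_1L_to_fasta := by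
  intro sequence1L num exp _
  unfold Spec_convert_1L_to_fasta convert_1L_to_fasta convert_1L_to_fasta_alt
  apply String.toList_inj.mp
  simp [fastaLoopA_toList, bodyA_zero, join_fastaLines_toList_aux sequence1L.toList.length sequence1L.toList (le_refl _)]
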